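-- pv_equiv track=rewrite | github.com/lnahyun/Study_codingtest | jinje/Re3/solution1/1.py | solution
-- ===== SOURCE A (Python) =====
-- def solution(s):
--     answer = 0
--     tmp = 0
--     cnt = 0
--     text = s[0]
--
--     for i in range(len(s)):
--         if tmp == 0:
--             text = s[i]
--             tmp = 1
--             cnt = 0
--         else:
--             if s[i] == text:
--                 tmp += 1
--             else:
--                 cnt += 1
--             if tmp == cnt:
--                 answer += 1
--                 tmp = 0
--
--     if tmp != 0:
--         answer += 1
--
--     return answer
-- ===== SOURCE B (Python) =====
-- def solution(s):
--     # stage 1: run-length encode the string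
--     runs = []
--     for c in s:
--         if runs and runs[-1][0] == c:
--             runs[-1][1] += 1
--         else:
--             runs.append([c, 1])
--     # stage 2: walk runs, consuming each run in one arithmetic step
--     answer = 0
--     first = None
--     bal = 0
--     for c, length in runs:
--         if first is None:
--             first = c
--             bal = length
--         elif c == first:
--             bal += length
--         elif length < bal:
--             bal -= length
--         else:
--             m = length - bal
--             if m > 0:
--                 answer += 1
--                 first = c
--                 bal = m
--             else:
--                 answer += 1
--                 first = None
--                 bal = 0
--     if first is not None:
--         answer += 1
--     return answer
-- ===== Notes on version B (the rewrite author's own statement) =====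
-- stated objective: alternative
-- what changed: Replaces A's per-character scan with two counters and a reset flag by a two-stage algorithm: first run-length encode the string, then walk the run list consuming each maximal run in one arithmetic step of a signed-balance jump.
import Mathlib
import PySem

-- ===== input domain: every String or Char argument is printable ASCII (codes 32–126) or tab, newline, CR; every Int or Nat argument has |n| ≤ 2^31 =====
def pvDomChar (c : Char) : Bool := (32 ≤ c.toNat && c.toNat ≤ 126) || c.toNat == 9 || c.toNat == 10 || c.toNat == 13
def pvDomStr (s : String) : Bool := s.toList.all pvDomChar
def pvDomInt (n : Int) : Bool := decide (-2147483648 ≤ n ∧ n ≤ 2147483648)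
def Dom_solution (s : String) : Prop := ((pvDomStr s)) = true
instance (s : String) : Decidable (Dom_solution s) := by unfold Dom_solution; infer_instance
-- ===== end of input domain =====

-- B replaces A's per-character two-counter scan by a two-stage algorithm:
-- run-length encode the string, then walk the run list with whole-run balance jumps.

-- ===== PORT A =====
-- state = (answer, tmp, cnt, text)
def stepA (st : Int × Int × Int × Char) (c : Char) : Int × Int × Int × Char :=
  match st with
  | (answer, tmp, cnt, text) =>
    if tmp = 0 then (answer, 1, 0, c)
    else
      let tmp' := if c = text then tmp + 1 else tmp
      let cnt' := if c = text then cnt else cnt + 1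
      if tmp' = cnt' then (answer + 1, 0, cnt', text) else (answer, tmp', cnt', text)

def solution (s : String) : Int :=
  let cs := s.toList
  let st := cs.foldl stepA (0, 0, 0, cs.headD ' ')  -- s[0] raises on ""; Pre_ excludes ""
  if st.2.1 ≠ 0 then st.1 + 1 else st.1

-- ===== PORT B =====
-- stage 1: run-length encoding; Python appends at the end / mutates the last run,
-- ported as the usual reversed accumulator (head = last run), reversed at the end
def rleStep (acc : List (Char × Nat)) (c : Char) : List (Char × Nat) :=
  match acc with
  | (d, n) :: rest => if d = c then (d, n + 1) :: rest else (c, 1) :: (d, n) :: rest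
  | [] => [(c, 1)]

-- stage 2: state = (answer, first, bal); one arithmetic step per run
def walkStep (st : Int × Option Char × Nat) (r : Char × Nat) : Int × Option Char × Nat :=
  match st, r with
  | (answer, none, _), (c, len) => (answer, some c, len)
  | (answer, some f, bal), (c, len) =>
    if c = f then (answer, some f, bal + len)
    else if len < bal then (answer, some f, bal - len)
    else
      let m := len - bal
      if 0 < m then (answer + 1, some c, m) else (answer + 1, none, 0)

def solution_alt (s : String) : Int :=
  let runs := (s.toList.foldl rleStep []).reverse
  let st := runs.foldl walkStep (0, none, 0)
  if st.2.1.isSome then st.1 + 1 else st.1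

-- ===== PRECONDITION & SPEC =====
-- Pre_ excludes only the empty string, on which A raises IndexError at s[0].
def Pre_solution (s : String) : Prop := s ≠ ""
instance (s : String) : Decidable (Pre_solution s) := by unfold Pre_solution; infer_instance
def pvWitness_solution : String := "aababcbcacaa"

def Spec_solution (s : String) (out : Int) : Prop := out = solution_alt s
instance (s : String) (out : Int) : Decidable (Spec_solution s out) := by unfold Spec_solution; infer_instance

-- ===== CLAIM (what is proved, stated in full; the proofs are below) =====
def Claim_equal_solution : Prop := ∀ (s : String), Dom_solution s → Pre_solution s → Spec_solution s (solution s)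

-- ===== LEMMAS AND PROOFS =====

def finA (st : Int × Int × Int × Char) : Int := if st.2.1 ≠ 0 then st.1 + 1 else st.1
def finB (st : Int × Option Char × Nat) : Int := if st.2.1.isSome then st.1 + 1 else st.1
def charStep (st : Int × Option Char × Nat) (c : Char) : Int × Option Char × Nat :=
  walkStep st (c, 1)

-- consuming a run of length n+1 = consuming a run of length n, then one more character
theorem walkStep_split (st : Int × Option Char × Nat) (c : Char) (n : Nat) :
    walkStep st (c, n + 1) = charStep (walkStep st (c, n)) c := by
  obtain ⟨ans, first, bal⟩ := st
  cases first with
  | none => simp [walkStep, charStep]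
  | some f =>
    by_cases hc : c = f
    · simp [walkStep, charStep, hc]; omega
    · by_cases h1 : n < bal
      · by_cases h2 : n + 1 < bal
        · simp [walkStep, charStep, hc, h1, h2, show 1 < bal - n by omega, Nat.sub_sub]
        · have hb : bal = n + 1 := by omega
          simp [walkStep, charStep, hc, hb]
      · by_cases h3 : 0 < n - bal
        · have h2 : ¬ n + 1 < bal := by omega
          have h4 : 0 < n + 1 - bal := by omega
          simp [walkStep, charStep, hc, h1, h2, h3, h4]
          omega
        · have h2 : ¬ n + 1 < bal := by omega
          have h4 : 0 < n + 1 - bal := by omega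
          simp [walkStep, charStep, hc, h1, h2, h3, h4]
          omega

-- one rleStep on the accumulator = one charStep on the walked state
theorem walk_rleStep (acc : List (Char × Nat)) (c : Char) (st : Int × Option Char × Nat) :
    ((rleStep acc c).reverse).foldl walkStep st = charStep (acc.reverse.foldl walkStep st) c := by
  cases acc with
  | nil => simp [rleStep, charStep, List.foldl]
  | cons p rest =>
    obtain ⟨d, n⟩ := p
    by_cases hd : d = c
    · simp [rleStep, hd, List.foldl_append]
      rw [walkStep_split]
    · simp [rleStep, hd, List.foldl_append, charStep]

-- walking the final run list = walking the string character by character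
theorem walk_expand : ∀ (cs : List Char) (acc : List (Char × Nat)) (st : Int × Option Char × Nat),
    ((cs.foldl rleStep acc).reverse).foldl walkStep st = cs.foldl charStep (acc.reverse.foldl walkStep st) := by
  intro cs
  induction cs with
  | nil => intro acc st; simp
  | cons c rest ih =>
    intro acc st
    rw [List.foldl_cons, ih, walk_rleStep, List.foldl_cons]

-- Joint invariant relating A's fold to B's char-by-char walk:
-- (mid) a mid-group A-state (0 < tmp, cnt < tmp) corresponds to B-state (answer, some text, tmp - cnt);
-- (top) a closed A-state (tmp = 0) corresponds to B-state (answer, none, 0).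
theorem AB_invariant : ∀ (cs : List Char),
    (∀ (text : Char) (tmp cnt answer : Int) (b : Nat), tmp - cnt = (b : Int) → 0 < b →
      0 < tmp → cnt < tmp →
      finA (cs.foldl stepA (answer, tmp, cnt, text)) = finB (cs.foldl charStep (answer, some text, b))) ∧
    (∀ (text : Char) (cnt answer : Int),
      finA (cs.foldl stepA (answer, 0, cnt, text)) = finB (cs.foldl charStep (answer, none, 0))) := by
  intro cs
  induction cs with
  | nil =>
    constructor
    · intro text tmp cnt answer b hb hb0 htmp hcnt
      have h0 : tmp ≠ 0 := by omega
      simp [finA, finB, h0]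
    · intro text cnt answer
      simp [finA, finB]
  | cons c rest ih =>
    obtain ⟨ihmid, ihtop⟩ := ih
    constructor
    · intro text tmp cnt answer b hb hb0 htmp hcnt
      have h0 : ¬ tmp = 0 := by omega
      by_cases hc : c = text
      · have h1 : stepA (answer, tmp, cnt, text) c = (answer, tmp + 1, cnt, text) := by
          have h2 : ¬ tmp + 1 = cnt := by omega
          simp [stepA, h0, hc, h2]
        have h3 : charStep (answer, some text, b) c = (answer, some text, b + 1) := by
          simp [charStep, walkStep, hc]
        rw [List.foldl_cons, h1, List.foldl_cons, h3]
        exact ihmid text (tmp + 1) cnt answer (b + 1) (by push_cast; omega) (by omega) (by omega) (by omega)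
      · by_cases he : tmp = cnt + 1
        · -- group closes (b = 1)
          have hb1 : b = 1 := by omega
          have h1 : stepA (answer, tmp, cnt, text) c = (answer + 1, 0, cnt + 1, text) := by
            have hcn : ¬ cnt + 1 = 0 := by omega
            simp [stepA, hc, he, hcn]
          have h3 : charStep (answer, some text, b) c = (answer + 1, none, 0) := by
            simp [charStep, walkStep, hc, hb1]
          rw [List.foldl_cons, h1, List.foldl_cons, h3]
          exact ihtop text (cnt + 1) (answer + 1)
        · -- mismatch, group stays open (b > 1)
          have hb2 : 1 < b := by omega
          have h1 : stepA (answer, tmp, cnt, text) c = (answer, tmp, cnt + 1, text) := by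
            have h2 : ¬ tmp = cnt + 1 := by omega
            simp [stepA, h0, hc, h2]
          have h3 : charStep (answer, some text, b) c = (answer, some text, b - 1) := by
            simp [charStep, walkStep, hc, hb2]
          rw [List.foldl_cons, h1, List.foldl_cons, h3]
          exact ihmid text tmp (cnt + 1) answer (b - 1) (by omega) (by omega) (by omega) (by omega)
    · intro text cnt answer
      have h1 : stepA (answer, 0, cnt, text) c = (answer, 1, 0, c) := by
        simp [stepA]
      have h3 : charStep (answer, none, 0) c = (answer, some c, 1) := by
        simp [charStep, walkStep]
      rw [List.foldl_cons, h1, List.foldl_cons, h3]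
      exact ihmid c 1 0 answer 1 (by norm_num) (by omega) (by omega) (by omega)

-- ===== VERDICT (by name: the statements are the Claim_ definitions above) =====
theorem solution_spec : Claim_equal_solution := by
  intro s _ _
  show solution s = solution_alt s
  have h1 := walk_expand s.toList [] (0, none, 0)
  simp only [List.reverse_nil, List.foldl_nil] at h1
  have key : finA (s.toList.foldl stepA (0, 0, 0, s.toList.headD ' ')) =
      finB ((s.toList.foldl rleStep []).reverse.foldl walkStep (0, none, 0)) := by
    rw [h1]
    exact (AB_invariant s.toList).2 (s.toList.headD ' ') 0 0
  exact key
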